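-- pv_equiv track=rewrite | github.com/Hamza65523/metacup-2023 | test2/b.py | find_largest_k_decker_burger
-- ===== SOURCE A (Python) =====
-- def can_build_k_decker_burger(A, B, C, K):
--   """Returns True if a K-decker cheeseburger can be built with the given budget and prices, False otherwise."""
--
--   # Calculate the total number of buns, cheese slices, and patties that can be bought with the given budget.
--   total_buns = C // A + 2 * (C // B)
--   total_cheese_slices = C // A + (C // B)
--   total_patties = C // A + (C // B)
--
--   # Check if there are enough buns, cheese slices, and patties to build the K-decker cheeseburger.
--   return K <= total_buns and K <= total_cheese_slices and K <= total_patties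
--
-- def find_largest_k_decker_burger(A, B, C):
--   """Returns the largest K for which a K-decker cheeseburger can be built with the given budget and prices, or 0 if you cannot build even a 1-decker cheeseburger."""
--
--   # Initialize the largest possible K to 0.
--   largest_k = 0
--
--   # Iterate over possible values of K, starting from 1.
--   for k in range(1, 101):
--     # If a K-decker cheeseburger can be built with the given budget and prices, update the largest possible K.
--     if can_build_k_decker_burger(A, B, C, k):
--       largest_k = k
--
--     # Otherwise, stop iterating.
--     else:
--       break
--
--   # Return the largest possible K.
--   return largest_k
-- ===== SOURCE B (Python) =====
-- def find_largest_k_decker_burger(A, B, C):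
--   """Closed form: the per-k feasibility test is monotone in k, so the answer is
--   min(buns, cheese, patties) clamped into [0, 100]."""
--   x = C // A
--   y = C // B
--   m = min(x + 2 * y, x + y)
--   return max(0, min(100, m))
-- ===== Notes on version B (the rewrite author's own statement) =====
-- stated objective: simpler
-- what changed: Replaces the 1..100 linear scan with a closed form: compute the resource totals once, take their minimum and clamp it into [0,100], relying on monotonicity of the per-k feasibility test.
import Mathlib
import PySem

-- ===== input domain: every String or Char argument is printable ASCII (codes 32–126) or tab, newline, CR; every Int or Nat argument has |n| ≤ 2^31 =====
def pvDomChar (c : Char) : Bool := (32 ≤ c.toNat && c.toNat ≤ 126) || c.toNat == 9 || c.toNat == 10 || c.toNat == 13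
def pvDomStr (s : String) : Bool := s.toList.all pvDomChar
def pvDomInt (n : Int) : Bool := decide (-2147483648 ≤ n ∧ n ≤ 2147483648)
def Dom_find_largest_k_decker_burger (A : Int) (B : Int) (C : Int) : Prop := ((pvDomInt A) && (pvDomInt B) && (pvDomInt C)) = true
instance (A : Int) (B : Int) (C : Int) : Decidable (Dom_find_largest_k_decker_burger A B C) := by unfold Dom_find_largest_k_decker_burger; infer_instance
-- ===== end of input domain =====

-- B replaces A's 1..100 scan with a closed form: min of the resource totals clamped into [0,100] (simpler; no loop).


-- ===== PORT A =====
def can_build_k_decker_burger (A : Int) (B : Int) (C : Int) (K : Int) : Bool :=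
  let total_buns := PySem.Int.floordiv C A + 2 * PySem.Int.floordiv C B
  let total_cheese_slices := PySem.Int.floordiv C A + PySem.Int.floordiv C B
  let total_patties := PySem.Int.floordiv C A + PySem.Int.floordiv C B
  decide (K ≤ total_buns) && (decide (K ≤ total_cheese_slices) && decide (K ≤ total_patties))

-- the 'for k in range(1,101)' loop with early break
def burgerLoop (A : Int) (B : Int) (C : Int) : List Int → Int → Int
  | [], largest_k => largest_k
  | k :: ks, largest_k =>
      if can_build_k_decker_burger A B C k then burgerLoop A B C ks k
      else largest_k

def find_largest_k_decker_burger (A : Int) (B : Int) (C : Int) : Int :=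
  burgerLoop A B C (PySem.List.pyRange 1 101 1) 0

-- ===== PORT B =====
def find_largest_k_decker_burger_alt (A : Int) (B : Int) (C : Int) : Int :=
  let x := PySem.Int.floordiv C A
  let y := PySem.Int.floordiv C B
  let m := min (x + 2 * y) (x + y)
  max 0 (min 100 m)

-- ===== PRECONDITION & SPEC =====
-- Python A raises ZeroDivisionError iff A = 0 or B = 0; excluded.
def Pre_find_largest_k_decker_burger (A : Int) (B : Int) (C : Int) : Prop := A ≠ 0 ∧ B ≠ 0
instance (A : Int) (B : Int) (C : Int) : Decidable (Pre_find_largest_k_decker_burger A B C) := by unfold Pre_find_largest_k_decker_burger; infer_instance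
def pvWitness_find_largest_k_decker_burger : Int × Int × Int := (2, 3, 10)

def Spec_find_largest_k_decker_burger (A : Int) (B : Int) (C : Int) (out : Int) : Prop := out = find_largest_k_decker_burger_alt A B C
instance (A : Int) (B : Int) (C : Int) (out : Int) : Decidable (Spec_find_largest_k_decker_burger A B C out) := by unfold Spec_find_largest_k_decker_burger; infer_instance

-- ===== CLAIM (what is proved, stated in full; the proofs are below) =====
def Claim_equal_find_largest_k_decker_burger : Prop := ∀ (A : Int) (B : Int) (C : Int), Dom_find_largest_k_decker_burger A B C → Pre_find_largest_k_decker_burger A B C → Spec_find_largest_k_decker_burger A B C (find_largest_k_decker_burger A B C)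

-- ===== LEMMAS AND PROOFS =====

lemma can_build_iff (A B C K : Int) :
    can_build_k_decker_burger A B C K = true ↔
      K ≤ min (PySem.Int.floordiv C A + 2 * PySem.Int.floordiv C B)
              (PySem.Int.floordiv C A + PySem.Int.floordiv C B) := by
  simp [can_build_k_decker_burger]
  omega

lemma burgerLoop_spec (A B C : Int) :
    ∀ (n : Nat) (k acc : Int), (101 - k).toNat = n → 1 ≤ k → k ≤ 101 → acc = k - 1 →
      burgerLoop A B C (PySem.List.pyRange k 101 1) acc =
        (if min (PySem.Int.floordiv C A + 2 * PySem.Int.floordiv C B)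
                (PySem.Int.floordiv C A + PySem.Int.floordiv C B) < k
         then k - 1
         else min (min (PySem.Int.floordiv C A + 2 * PySem.Int.floordiv C B)
                       (PySem.Int.floordiv C A + PySem.Int.floordiv C B)) 100) := by
  intro n
  induction n with
  | zero =>
      intro k acc h0 h1 h2 hacc
      have hk : k = 101 := by omega
      subst hk hacc
      simp [burgerLoop]
      omega
  | succ n ih =>
      intro k acc h0 h1 h2 hacc
      have hk : k < 101 := by omega
      rw [PySem.List.pyRange_one_cons (by omega)]
      simp only [burgerLoop]
      by_cases hc : can_build_k_decker_burger A B C k = true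
      · rw [if_pos hc]
        rw [can_build_iff] at hc
        rw [ih (k + 1) k (by omega) (by omega) (by omega) (by omega)]
        split_ifs <;> omega
      · rw [if_neg hc]
        rw [can_build_iff] at hc
        split_ifs <;> omega

-- ===== VERDICT (by name: the statement is the Claim_ definition above) =====
theorem find_largest_k_decker_burger_spec : Claim_equal_find_largest_k_decker_burger := by
  intro A B C _ _
  unfold Spec_find_largest_k_decker_burger find_largest_k_decker_burger find_largest_k_decker_burger_alt
  rw [burgerLoop_spec A B C 100 1 0 (by decide) (by decide) (by decide) (by decide)]
  dsimp only
  split_ifs <;> omega
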